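-- pv_equiv track=rewrite | github.com/RicoPsych/SelectHitboxScript | setHitbox.py | SumHitboxRectanglesHorizontal
-- ===== SOURCE A (Python) =====
-- from collections import defaultdict
--
-- def SumHitboxRectanglesHorizontal(hitboxRectangles):
--     summedRectangles = []
--     rectangleRows = defaultdict(list)
--
--     for rectangle in hitboxRectangles:
--         rectangleRows[rectangle[1]].append(rectangle)
--
--     for row in rectangleRows:
--         rowRect = (rectangleRows[row][0][0],
--                 rectangleRows[row][0][1],
--                 rectangleRows[row][-1][0]-rectangleRows[row][0][0] + rectangleRows[row][-1][2],
--                 rectangleRows[row][0][3])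
--
--     ##TODO:possibility to add multiple row rectangles if there is a gap ???
--
--         summedRectangles.append(rowRect)
--
--     return summedRectangles
-- ===== SOURCE B (Python) =====
-- def SumHitboxRectanglesHorizontal(hitboxRectangles):
--     # One pass: keep a running merged rectangle per row, keyed by y.
--     merged = {}
--     for rect in hitboxRectangles:
--         cur = merged.get(rect[1])
--         if cur is None:
--             merged[rect[1]] = rect
--         else:
--             merged[rect[1]] = (cur[0], cur[1], rect[0] - cur[0] + rect[2], cur[3])
--     return list(merged.values())
-- ===== Notes on version B (the rewrite author's own statement) =====
-- stated objective: alternative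
-- what changed: Replaces A's two-phase group-into-lists-then-reduce (defaultdict of per-row lists, second loop computing the span from the first and last list element) by a single pass that keeps one running merged rectangle per row and updates its width in place.
import Mathlib
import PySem

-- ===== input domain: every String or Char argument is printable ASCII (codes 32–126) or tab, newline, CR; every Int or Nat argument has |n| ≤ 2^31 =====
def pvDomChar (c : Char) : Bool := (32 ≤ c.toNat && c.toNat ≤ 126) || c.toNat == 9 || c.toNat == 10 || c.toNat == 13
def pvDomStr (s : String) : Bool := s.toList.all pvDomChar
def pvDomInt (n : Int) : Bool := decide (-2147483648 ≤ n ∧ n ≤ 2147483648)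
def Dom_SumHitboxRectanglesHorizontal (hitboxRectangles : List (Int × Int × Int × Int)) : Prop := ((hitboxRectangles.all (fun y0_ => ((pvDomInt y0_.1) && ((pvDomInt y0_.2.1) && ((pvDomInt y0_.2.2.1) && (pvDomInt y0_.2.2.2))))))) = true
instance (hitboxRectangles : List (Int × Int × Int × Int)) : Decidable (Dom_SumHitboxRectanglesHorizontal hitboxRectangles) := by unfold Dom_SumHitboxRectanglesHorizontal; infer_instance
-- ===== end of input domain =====

-- B replaces A's group-into-lists-then-reduce by a single pass keeping one running
-- merged rectangle per row (objective: alternative decomposition, same cost).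

-- ===== PORT A =====
-- defaultdict(list) with .append is Dict.modify with default []; the groups are built by
-- appends so they are nonempty, and the [0] / [-1] indexings (which cannot raise there)
-- are transcribed as headD / getLastD with an unreachable default (0,0,0,0).
def SumHitboxRectanglesHorizontal (hitboxRectangles : List (Int × Int × Int × Int)) : List (Int × Int × Int × Int) :=
  let rectangleRows : PySem.Dict Int (List (Int × Int × Int × Int)) :=
    hitboxRectangles.foldl (fun d rectangle => d.modify rectangle.2.1 [] (· ++ [rectangle])) PySem.Dict.empty
  rectangleRows.items.foldl (fun summedRectangles p =>
    let grp := p.2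
    let first := grp.headD (0, 0, 0, 0)
    let last := grp.getLastD (0, 0, 0, 0)
    summedRectangles ++ [(first.1, first.2.1, last.1 - first.1 + last.2.2.1, first.2.2.2)]) []

-- ===== PORT B =====
def SumHitboxRectanglesHorizontal_alt (hitboxRectangles : List (Int × Int × Int × Int)) : List (Int × Int × Int × Int) :=
  let merged : PySem.Dict Int (Int × Int × Int × Int) :=
    hitboxRectangles.foldl (fun d rect =>
      match d.get? rect.2.1 with
      | none => d.insert rect.2.1 rect
      | some cur => d.insert rect.2.1 (cur.1, cur.2.1, rect.1 - cur.1 + rect.2.2.1, cur.2.2.2)) PySem.Dict.empty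
  merged.values

-- ===== PRECONDITION & SPEC =====
def Spec_SumHitboxRectanglesHorizontal (hitboxRectangles : List (Int × Int × Int × Int)) (out : List (Int × Int × Int × Int)) : Prop := out = SumHitboxRectanglesHorizontal_alt hitboxRectangles
instance (hitboxRectangles : List (Int × Int × Int × Int)) (out : List (Int × Int × Int × Int)) : Decidable (Spec_SumHitboxRectanglesHorizontal hitboxRectangles out) := by unfold Spec_SumHitboxRectanglesHorizontal; infer_instance

-- ===== CLAIM (what is proved, stated in full; the proofs are below) =====
def Claim_equal_SumHitboxRectanglesHorizontal : Prop := ∀ (hitboxRectangles : List (Int × Int × Int × Int)), Dom_SumHitboxRectanglesHorizontal hitboxRectangles → Spec_SumHitboxRectanglesHorizontal hitboxRectangles (SumHitboxRectanglesHorizontal hitboxRectangles)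

-- ===== LEMMAS AND PROOFS =====

-- the per-group reduction A performs, as a function of the group
def pvMerge (grp : List (Int × Int × Int × Int)) : Int × Int × Int × Int :=
  let first := grp.headD (0, 0, 0, 0)
  let last := grp.getLastD (0, 0, 0, 0)
  (first.1, first.2.1, last.1 - first.1 + last.2.2.1, first.2.2.2)

-- invariant relating the two loop states
def pvInv (dA : PySem.Dict Int (List (Int × Int × Int × Int)))
    (dB : PySem.Dict Int (Int × Int × Int × Int)) : Prop :=
  dA.keys.Nodup ∧ (∀ p ∈ dA.items, p.2 ≠ []) ∧
  dB.items = dA.items.map (fun p => (p.1, pvMerge p.2))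

theorem pvMerge_append (grp : List (Int × Int × Int × Int)) (r : Int × Int × Int × Int)
    (h : grp ≠ []) :
    pvMerge (grp ++ [r]) =
      ((pvMerge grp).1, (pvMerge grp).2.1, r.1 - (pvMerge grp).1 + r.2.2.1, (pvMerge grp).2.2.2) := by
  obtain ⟨a, t, rfl⟩ := List.exists_cons_of_ne_nil h
  have hl : (a :: (t ++ [r])).getLast? = some r := by
    rw [← List.cons_append]; exact List.getLast?_concat
  simp [pvMerge, hl]

theorem pvKeys_eq (dA : PySem.Dict Int (List (Int × Int × Int × Int)))
    (dB : PySem.Dict Int (Int × Int × Int × Int))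
    (h : dB.items = dA.items.map (fun p => (p.1, pvMerge p.2))) : dB.keys = dA.keys := by
  show dB.items.map (·.1) = dA.items.map (·.1)
  simp [h, List.map_map, Function.comp]

theorem pvInv_step (dA : PySem.Dict Int (List (Int × Int × Int × Int)))
    (dB : PySem.Dict Int (Int × Int × Int × Int)) (r : Int × Int × Int × Int)
    (h : pvInv dA dB) :
    pvInv (dA.modify r.2.1 [] (· ++ [r]))
      (match dB.get? r.2.1 with
       | none => dB.insert r.2.1 r
       | some cur => dB.insert r.2.1 (cur.1, cur.2.1, r.1 - cur.1 + r.2.2.1, cur.2.2.2)) := by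
  obtain ⟨hnd, hne, hitems⟩ := h
  have hkeys := pvKeys_eq dA dB hitems
  have hmod : dA.modify r.2.1 [] (· ++ [r]) = dA.insert r.2.1 (dA.getD r.2.1 [] ++ [r]) := rfl
  by_cases hc : dA.contains r.2.1 = true
  · -- the row is already present in both dicts
    obtain ⟨grp, hget⟩ : ∃ g, dA.get? r.2.1 = some g := by
      cases hg : dA.get? r.2.1 with
      | none => exact absurd hc (by simp [PySem.Dict.contains_eq_isSome_get?, hg])
      | some g => exact ⟨g, rfl⟩
    have hgrp_mem : (r.2.1, grp) ∈ dA.items := PySem.Dict.mem_items_of_get?_eq_some _ hget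
    have hgrp_ne : grp ≠ [] := hne _ hgrp_mem
    have hgetD : dA.getD r.2.1 [] = grp := PySem.Dict.getD_of_get?_eq_some _ _ hget
    have hBget : dB.get? r.2.1 = some (pvMerge grp) := by
      have hmem : (r.2.1, pvMerge grp) ∈ dB.items := by
        rw [hitems]; exact List.mem_map_of_mem hgrp_mem
      exact PySem.Dict.get?_of_mem_items _ hmem (by rw [pvKeys_eq dA dB hitems]; exact hnd)
    have hcB : dB.contains r.2.1 = true := by
      simp [PySem.Dict.contains_eq_isSome_get?, hBget]
    refine ⟨?_, ?_, ?_⟩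
    · rw [hmod, PySem.Dict.keys_insert_of_contains _ _ hc]; exact hnd
    · intro p hp
      rw [hmod, PySem.Dict.items_insert_of_contains _ _ hc] at hp
      obtain ⟨q, hq, rfl⟩ := List.mem_map.mp hp
      by_cases hqk : q.1 == r.2.1
      · simp [hqk]
      · simp only [hqk] at *
        simpa using hne q hq
    · rw [hBget]
      rw [hmod, PySem.Dict.items_insert_of_contains _ _ hc,
        PySem.Dict.items_insert_of_contains _ _ hcB, hitems,
        List.map_map, List.map_map]
      apply List.map_congr_left
      intro q hq
      by_cases hqk : q.1 = r.2.1
      · have hq2 : q.2 = grp := by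
          have : dA.get? q.1 = some q.2 := PySem.Dict.get?_of_mem_items _ hq hnd
          rw [hqk, hget] at this; exact (Option.some_inj.mp this).symm
        simp [Function.comp, hqk, hgetD, pvMerge_append grp r hgrp_ne]
      · simp [Function.comp, hqk]
  · -- first rectangle of its row
    rw [Bool.not_eq_true] at hc
    have hcB : dB.contains r.2.1 = false := by
      have : dB.contains r.2.1 = dA.contains r.2.1 := by
        simp [PySem.Dict.contains_eq_decide_mem_keys, hkeys]
      simp [this, hc]
    have hBget : dB.get? r.2.1 = none := by
      have := PySem.Dict.contains_eq_isSome_get? (d := dB) (k := r.2.1)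
      rw [hcB] at this
      exact Option.not_isSome_iff_eq_none.mp (by simp [← this])
    have hget : dA.getD r.2.1 [] = [] := PySem.Dict.getD_of_not_contains _ _ hc
    refine ⟨?_, ?_, ?_⟩
    · rw [hmod, PySem.Dict.keys_insert_of_not_contains _ _ hc]
      refine List.Nodup.append hnd (List.nodup_singleton _) ?_
      intro a ha hb
      simp only [List.mem_singleton] at hb
      subst hb
      rw [PySem.Dict.contains_eq_decide_mem_keys] at hc
      simp [ha] at hc
    · intro p hp
      rw [hmod, PySem.Dict.items_insert_of_not_contains _ _ hc] at hp
      rcases List.mem_append.mp hp with hp | hp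
      · exact hne p hp
      · simp only [List.mem_singleton] at hp; subst hp; simp [hget]
    · rw [hBget]
      rw [hmod, PySem.Dict.items_insert_of_not_contains _ _ hc,
        PySem.Dict.items_insert_of_not_contains _ _ hcB, hitems, List.map_append]
      simp [hget, pvMerge]
theorem pvInv_loop (l : List (Int × Int × Int × Int))
    (dA : PySem.Dict Int (List (Int × Int × Int × Int)))
    (dB : PySem.Dict Int (Int × Int × Int × Int)) (h : pvInv dA dB) :
    pvInv (l.foldl (fun d rectangle => d.modify rectangle.2.1 [] (· ++ [rectangle])) dA)
      (l.foldl (fun d rect =>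
        match d.get? rect.2.1 with
        | none => d.insert rect.2.1 rect
        | some cur => d.insert rect.2.1 (cur.1, cur.2.1, rect.1 - cur.1 + rect.2.2.1, cur.2.2.2)) dB) := by
  induction l generalizing dA dB with
  | nil => exact h
  | cons r t ih => exact ih _ _ (pvInv_step dA dB r h)

theorem pvFoldl_append_map (l : List (Int × List (Int × Int × Int × Int))) (acc : List (Int × Int × Int × Int)) :
    (l.foldl (fun s p => s ++ [pvMerge p.2]) acc) = acc ++ l.map (fun p => pvMerge p.2) := by
  induction l generalizing acc with
  | nil => simp
  | cons x t ih => simp [ih]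

-- ===== VERDICT (by name: the statement is the Claim_ definition above) =====
theorem SumHitboxRectanglesHorizontal_spec : Claim_equal_SumHitboxRectanglesHorizontal := by
  intro hl _
  have hinv := pvInv_loop hl PySem.Dict.empty PySem.Dict.empty
    ⟨by simp [PySem.Dict.keys, PySem.Dict.empty],
     by simp [PySem.Dict.empty],
     by simp [PySem.Dict.empty]⟩
  unfold Spec_SumHitboxRectanglesHorizontal SumHitboxRectanglesHorizontal SumHitboxRectanglesHorizontal_alt
  obtain ⟨_, _, hitems⟩ := hinv
  show (_ : List _).foldl (fun (s : List (Int × Int × Int × Int)) (p : Int × List (Int × Int × Int × Int)) => s ++ [pvMerge p.2]) [] = _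
  rw [pvFoldl_append_map]
  show _ = (PySem.Dict.values _)
  simp only [PySem.Dict.values, hitems, List.map_map]
  simp
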